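-- pv_equiv track=rewrite | github.com/Ashvin-Ranjan/NLP-Learning | ngrams/letter_markov/letter_markov.py | flatten_ngram_map
-- ===== SOURCE A (Python) =====
-- def flatten_ngram_map(ngram_map):
--     flattened_map = {}
--     for ngram, values in ngram_map.items():
--         if ngram[1:] in flattened_map:
--             for unigram, value in values.items():
--                 if unigram in flattened_map[ngram[1:]]:
--                     flattened_map[ngram[1:]][unigram] += value
--                 else:
--                     flattened_map[ngram[1:]][unigram] = value
--         else:
--             flattened_map[ngram[1:]] = values
--     return flattened_map
-- ===== SOURCE B (Python) =====
-- def flatten_ngram_map(ngram_map):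
--     # Two-pass group-then-merge; mutates the first value-dict of each suffix
--     # group in place, exactly as the original does.
--     groups = {}
--     for ngram, values in ngram_map.items():
--         groups.setdefault(ngram[1:], []).append(values)
--     result = {}
--     for suffix, dicts in groups.items():
--         base = dicts[0]
--         for d in dicts[1:]:
--             for unigram, value in d.items():
--                 base[unigram] = base.get(unigram, 0) + value
--         result[suffix] = base
--     return result
-- ===== Notes on version B (the rewrite author's own statement) =====
-- stated objective: alternative
-- what changed: B replaces A's single interleaved check-then-merge loop by two passes: first group the value-dicts by suffix key into a dict of lists, then merge each group's dicts into its first dict; same asymptotic cost, different decomposition (A and B both mutate the input's inner dicts in place; the claim is about the return value, which here coincides with that mutation).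
import Mathlib
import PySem

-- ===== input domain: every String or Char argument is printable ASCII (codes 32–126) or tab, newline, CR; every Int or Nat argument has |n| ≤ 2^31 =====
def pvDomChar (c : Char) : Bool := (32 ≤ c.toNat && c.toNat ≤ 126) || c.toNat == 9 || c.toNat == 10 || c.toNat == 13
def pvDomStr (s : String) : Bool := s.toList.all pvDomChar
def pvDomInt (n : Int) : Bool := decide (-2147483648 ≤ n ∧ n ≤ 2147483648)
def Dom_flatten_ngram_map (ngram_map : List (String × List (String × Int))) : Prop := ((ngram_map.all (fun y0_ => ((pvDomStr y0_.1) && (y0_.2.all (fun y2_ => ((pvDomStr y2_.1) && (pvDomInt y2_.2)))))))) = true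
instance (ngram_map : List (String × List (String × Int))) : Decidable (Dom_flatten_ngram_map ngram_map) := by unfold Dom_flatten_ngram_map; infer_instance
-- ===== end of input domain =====

-- B regroups A's single interleaved check-then-merge loop into two passes (group by suffix, then
-- merge each group); same cost, different decomposition.  Both Pythons mutate the input's inner
-- dicts in place; the equivalence proved here is about the RETURN value.

-- ===== PORT A =====
-- ngram[1:]
def pvSfx (s : String) : String := PySem.Str.slice s (some 1) none

-- one iteration of A's outer loop ('if ngram[1:] in flattened_map: … else: …')
def pvAStep (fm : PySem.Dict String (PySem.Dict String Int)) (pr : String × List (String × Int)) :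
    PySem.Dict String (PySem.Dict String Int) :=
  if fm.contains (pvSfx pr.1) then
    -- for unigram, value in values.items(): if unigram in fm[s]: fm[s][u] += v else: fm[s][u] = v
    pr.2.foldl (fun fm q =>
      fm.modify (pvSfx pr.1) PySem.Dict.empty (fun d =>
        if d.contains q.1 then d.insert q.1 (d.getD q.1 0 + q.2) else d.insert q.1 q.2)) fm
  else
    fm.insert (pvSfx pr.1) (PySem.Dict.mk pr.2)

def flatten_ngram_map (ngram_map : List (String × List (String × Int))) : List (String × List (String × Int)) :=
  ((ngram_map.foldl pvAStep PySem.Dict.empty).items.map (fun p => (p.1, p.2.items)))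

-- ===== PORT B =====
-- groups.setdefault(ngram[1:], []).append(values)
def pvGStep (g : PySem.Dict String (List (List (String × Int)))) (pr : String × List (String × Int)) :
    PySem.Dict String (List (List (String × Int))) :=
  g.modify (pvSfx pr.1) [] (fun l => l ++ [pr.2])

-- for unigram, value in d.items(): base[unigram] = base.get(unigram, 0) + value
def pvMergeOne (b : PySem.Dict String Int) (d : List (String × Int)) : PySem.Dict String Int :=
  d.foldl (fun b q => b.insert q.1 (b.getD q.1 0 + q.2)) b

-- one iteration of B's second loop: base = dicts[0]; fold dicts[1:] into it; result[suffix] = base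
def pvMStep (res : PySem.Dict String (PySem.Dict String Int)) (pr : String × List (List (String × Int))) :
    PySem.Dict String (PySem.Dict String Int) :=
  match pr.2 with
  | [] => res
  | v :: r => res.insert pr.1 (r.foldl pvMergeOne (PySem.Dict.mk v))

def flatten_ngram_map_alt (ngram_map : List (String × List (String × Int))) : List (String × List (String × Int)) :=
  (((ngram_map.foldl pvGStep PySem.Dict.empty).items.foldl pvMStep PySem.Dict.empty).items.map
    (fun p => (p.1, p.2.items)))

-- ===== PRECONDITION & SPEC =====
def Spec_flatten_ngram_map (ngram_map : List (String × List (String × Int))) (out : List (String × List (String × Int))) : Prop := out = flatten_ngram_map_alt ngram_map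
instance (ngram_map : List (String × List (String × Int))) (out : List (String × List (String × Int))) : Decidable (Spec_flatten_ngram_map ngram_map out) := by unfold Spec_flatten_ngram_map; infer_instance

-- ===== CLAIM (what is proved, stated in full; the proofs are below) =====
def Claim_equal_flatten_ngram_map : Prop := ∀ (ngram_map : List (String × List (String × Int))), Dom_flatten_ngram_map ngram_map → Spec_flatten_ngram_map ngram_map (flatten_ngram_map ngram_map)

-- ===== LEMMAS AND PROOFS =====

-- B's merged value of one suffix group
def pvMergeList (l : List (List (String × Int))) : PySem.Dict String Int :=
  match l with
  | [] => PySem.Dict.empty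
  | v :: r => r.foldl pvMergeOne (PySem.Dict.mk v)

-- pvGStep preserves: keys Nodup, all group lists nonempty
lemma pvGStep_inv (g : PySem.Dict String (List (List (String × Int))))
    (x : String × List (String × Int))
    (hn : g.keys.Nodup) (hv : ∀ p ∈ g.items, p.2 ≠ []) :
    (pvGStep g x).keys.Nodup ∧ ∀ p ∈ (pvGStep g x).items, p.2 ≠ [] := by
  unfold pvGStep PySem.Dict.modify
  refine ⟨PySem.Dict.nodup_keys_insert _ _ _ hn, ?_⟩
  intro p hp
  rw [PySem.Dict.mem_items_insert] at hp
  rcases hp with h | ⟨h, _⟩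
  · subst h; simp
  · exact hv p h

lemma pvGroups_inv (m : List (String × List (String × Int))) :
    (m.foldl pvGStep PySem.Dict.empty).keys.Nodup ∧
      ∀ p ∈ (m.foldl pvGStep PySem.Dict.empty).items, p.2 ≠ [] := by
  suffices h : ∀ (g : PySem.Dict String (List (List (String × Int)))),
      g.keys.Nodup → (∀ p ∈ g.items, p.2 ≠ []) →
      (m.foldl pvGStep g).keys.Nodup ∧ ∀ p ∈ (m.foldl pvGStep g).items, p.2 ≠ [] by
    refine h PySem.Dict.empty ?_ ?_ <;> simp [PySem.Dict.empty]
  induction m with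
  | nil => intro g hn hv; exact ⟨hn, hv⟩
  | cons x t ih =>
    intro g hn hv
    obtain ⟨hn', hv'⟩ := pvGStep_inv g x hn hv
    exact ih (pvGStep g x) hn' hv' 

-- B's second pass, characterised as a map over the group table
lemma pvMStep_foldl (L : List (String × List (List (String × Int))))
    (res : PySem.Dict String (PySem.Dict String Int))
    (hdisj : ∀ p ∈ L, res.contains p.1 = false)
    (hnodup : (L.map Prod.fst).Nodup)
    (hne : ∀ p ∈ L, p.2 ≠ []) :
    (L.foldl pvMStep res).items = res.items ++ L.map (fun p => (p.1, pvMergeList p.2)) := by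
  induction L generalizing res with
  | nil => simp
  | cons p T ih =>
    obtain ⟨v, r, hvr⟩ : ∃ v r, p.2 = v :: r := by
      cases h : p.2 with
      | nil => exact absurd h (hne p (by simp))
      | cons v r => exact ⟨v, r, rfl⟩
    have hstep : pvMStep res p = res.insert p.1 (r.foldl pvMergeOne (PySem.Dict.mk v)) := by
      unfold pvMStep; rw [hvr]
    have hml : pvMergeList p.2 = r.foldl pvMergeOne (PySem.Dict.mk v) := by
      unfold pvMergeList; rw [hvr]
    simp only [List.foldl_cons, hstep]
    rw [ih]
    · rw [PySem.Dict.items_insert_of_not_contains res _ (hdisj p (by simp))]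
      simp [hml]
    · intro q hq
      rw [PySem.Dict.contains_insert]
      have hne1 : q.1 ≠ p.1 := by
        simp only [List.map_cons, List.nodup_cons] at hnodup
        intro h; exact hnodup.1 (h ▸ List.mem_map_of_mem hq)
      simp [hne1, hdisj q (List.mem_cons_of_mem _ hq)]
    · simpa using hnodup.of_cons
    · exact fun q hq => hne q (List.mem_cons_of_mem _ hq)

def pvMerge (g : PySem.Dict String (List (List (String × Int)))) :
    PySem.Dict String (PySem.Dict String Int) :=
  g.items.foldl pvMStep PySem.Dict.empty

lemma pvMerge_items (g : PySem.Dict String (List (List (String × Int))))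
    (hn : g.keys.Nodup) (hv : ∀ p ∈ g.items, p.2 ≠ []) :
    (pvMerge g).items = g.items.map (fun p => (p.1, pvMergeList p.2)) := by
  unfold pvMerge
  rw [pvMStep_foldl g.items PySem.Dict.empty (by simp [PySem.Dict.empty, PySem.Dict.contains]) hn hv]
  simp [PySem.Dict.empty]

-- inserting the present value back is the identity (Nodup keys)
lemma pvInsert_getD_self (d : PySem.Dict String (PySem.Dict String Int)) (k : String)
    (hc : d.contains k = true) (hn : d.keys.Nodup) :
    d.insert k (d.getD k PySem.Dict.empty) = d := by
  apply PySem.Dict.ext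
  rw [PySem.Dict.items_insert_of_contains d _ hc]
  conv_rhs => rw [← List.map_id d.items]
  apply List.map_congr_left
  intro p hp
  by_cases hk : p.1 = k
  · have h1 : d.get? k = some p.2 := by
      apply PySem.Dict.get?_of_mem_items _ _ hn
      rw [← hk]; exact hp
    have : d.getD k PySem.Dict.empty = p.2 := PySem.Dict.getD_of_get?_eq_some _ _ h1
    simp only [hk, this, beq_self_eq_true, if_true]
    exact Prod.ext hk.symm rfl
  · simp [hk]

-- A's inner loop over values.items(), pulled inside a single update of fm at s
lemma pvFoldl_insert_at (l : List (String × Int))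
    (F : (String × Int) → PySem.Dict String Int → PySem.Dict String Int) :
    ∀ (fm : PySem.Dict String (PySem.Dict String Int)) (s : String),
      fm.contains s = true → fm.keys.Nodup →
      l.foldl (fun fm q => fm.insert s (F q (fm.getD s PySem.Dict.empty))) fm
        = fm.insert s (l.foldl (fun d q => F q d) (fm.getD s PySem.Dict.empty)) := by
  induction l with
  | nil =>
    intro fm s hc hn
    simp [pvInsert_getD_self fm s hc hn]
  | cons q l ih =>
    intro fm s hc hn
    simp only [List.foldl_cons]
    rw [ih (fm.insert s (F q (fm.getD s PySem.Dict.empty))) s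
        (PySem.Dict.contains_insert_self fm s _)
        (PySem.Dict.nodup_keys_insert fm s _ hn)]
    rw [PySem.Dict.getD_insert_self, PySem.Dict.insert_insert_self]

-- A's inner branch equals B's unconditional get-or-0 update
lemma pvInner_eq (d : PySem.Dict String Int) (q : String × Int) :
    (if d.contains q.1 then d.insert q.1 (d.getD q.1 0 + q.2) else d.insert q.1 q.2)
      = d.insert q.1 (d.getD q.1 0 + q.2) := by
  by_cases hc : d.contains q.1
  · simp [hc]
  · simp only [Bool.not_eq_true] at hc
    simp [hc, PySem.Dict.getD_of_not_contains d 0 hc]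

lemma pvMerge_keys (g : PySem.Dict String (List (List (String × Int))))
    (hn : g.keys.Nodup) (hv : ∀ p ∈ g.items, p.2 ≠ []) :
    (pvMerge g).keys = g.keys := by
  simp only [PySem.Dict.keys]
  rw [pvMerge_items g hn hv, List.map_map]
  rfl

lemma pvMerge_contains (g : PySem.Dict String (List (List (String × Int))))
    (hn : g.keys.Nodup) (hv : ∀ p ∈ g.items, p.2 ≠ []) (s : String) :
    (pvMerge g).contains s = g.contains s := by
  rw [PySem.Dict.contains_eq_decide_mem_keys, PySem.Dict.contains_eq_decide_mem_keys,
    pvMerge_keys g hn hv]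

-- the key commutation: merging after grouping one more entry = A's step on the merged table
lemma pvKey (g : PySem.Dict String (List (List (String × Int))))
    (x : String × List (String × Int))
    (hn : g.keys.Nodup) (hv : ∀ p ∈ g.items, p.2 ≠ []) :
    pvMerge (pvGStep g x) = pvAStep (pvMerge g) x := by
  obtain ⟨hn', hv'⟩ := pvGStep_inv g x hn hv
  have hmn : (pvMerge g).keys.Nodup := by rw [pvMerge_keys g hn hv]; exact hn
  by_cases hc : g.contains (pvSfx x.1)
  · -- suffix already present: A merges values.items() into fm[s]
    obtain ⟨v, hv0⟩ : ∃ v, g.get? (pvSfx x.1) = some v := by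
      have := PySem.Dict.contains_eq_isSome_get? (d := g) (k := pvSfx x.1)
      rw [hc] at this
      exact Option.isSome_iff_exists.mp this.symm
    have hmem : (pvSfx x.1, v) ∈ g.items := PySem.Dict.mem_items_of_get?_eq_some _ hv0
    obtain ⟨v0, r, hvr⟩ : ∃ v0 r, v = v0 :: r := by
      cases hvv : v with
      | nil => exact absurd (hvv ▸ hv (pvSfx x.1, v) hmem) (by simp)
      | cons v0 r => exact ⟨v0, r, rfl⟩
    have hgd : g.getD (pvSfx x.1) [] = v := PySem.Dict.getD_of_get?_eq_some _ _ hv0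
    have hitems : (pvGStep g x).items
        = g.items.map (fun p => if p.1 == pvSfx x.1 then (pvSfx x.1, v ++ [x.2]) else p) := by
      show (g.insert (pvSfx x.1) (g.getD (pvSfx x.1) [] ++ [x.2])).items = _
      rw [hgd]
      exact PySem.Dict.items_insert_of_contains g _ hc
    have hmc : (pvMerge g).contains (pvSfx x.1) = true := by
      rw [pvMerge_contains g hn hv]; exact hc
    have hmgd : (pvMerge g).getD (pvSfx x.1) PySem.Dict.empty = pvMergeList v := by
      apply PySem.Dict.getD_of_mem_items
      · rw [pvMerge_items g hn hv]
        exact List.mem_map_of_mem (f := fun p => (p.1, pvMergeList p.2)) hmem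
      · exact hmn
    unfold pvAStep
    rw [if_pos hmc]
    simp only [PySem.Dict.modify]
    rw [pvFoldl_insert_at x.2
      (fun q d => if d.contains q.1 then d.insert q.1 (d.getD q.1 0 + q.2) else d.insert q.1 q.2)
      (pvMerge g) (pvSfx x.1) hmc hmn]
    rw [hmgd]
    have hstep : (fun (d : PySem.Dict String Int) (q : String × Int) =>
        if d.contains q.1 then d.insert q.1 (d.getD q.1 0 + q.2) else d.insert q.1 q.2)
        = fun d q => d.insert q.1 (d.getD q.1 0 + q.2) := by
      funext d q; exact pvInner_eq d q
    rw [hstep]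
    have hW : x.2.foldl (fun (d : PySem.Dict String Int) q => d.insert q.1 (d.getD q.1 0 + q.2))
        (pvMergeList v) = pvMergeList (v ++ [x.2]) := by
      rw [hvr]
      show pvMergeOne ((r.foldl pvMergeOne (PySem.Dict.mk v0))) x.2
          = (r ++ [x.2]).foldl pvMergeOne (PySem.Dict.mk v0)
      rw [List.foldl_append]
      rfl
    rw [hW]
    apply PySem.Dict.ext
    rw [PySem.Dict.items_insert_of_contains _ _ hmc, pvMerge_items g hn hv,
      pvMerge_items _ hn' hv', hitems]
    simp only [List.map_map]
    apply List.map_congr_left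
    intro p _
    by_cases hk : p.1 = pvSfx x.1
    · simp [Function.comp, hk]
    · simp [Function.comp, hk]
  · -- new suffix: A stores the values dict itself
    have hc' : g.contains (pvSfx x.1) = false := by simpa using hc
    have hgd : g.getD (pvSfx x.1) [] = [] := PySem.Dict.getD_of_not_contains g _ hc'
    have hitems : (pvGStep g x).items = g.items ++ [(pvSfx x.1, [x.2])] := by
      show (g.insert (pvSfx x.1) (g.getD (pvSfx x.1) [] ++ [x.2])).items = _
      rw [hgd]
      exact PySem.Dict.items_insert_of_not_contains g _ hc'
    have hmc : (pvMerge g).contains (pvSfx x.1) = false := by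
      rw [pvMerge_contains g hn hv]; exact hc'
    unfold pvAStep
    rw [if_neg (by simp [hmc])]
    apply PySem.Dict.ext
    rw [PySem.Dict.items_insert_of_not_contains _ _ hmc, pvMerge_items g hn hv,
      pvMerge_items _ hn' hv', hitems]
    simp [pvMergeList]

lemma pvMain (m : List (String × List (String × Int))) :
    m.foldl pvAStep PySem.Dict.empty = pvMerge (m.foldl pvGStep PySem.Dict.empty) := by
  induction m using List.reverseRecOn with
  | nil => rfl
  | append_singleton t x ih =>
    rw [List.foldl_append, List.foldl_append]
    simp only [List.foldl_cons, List.foldl_nil]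
    obtain ⟨hn, hv⟩ := pvGroups_inv t
    rw [ih, ← pvKey _ x hn hv]

-- ===== VERDICT (by name: the statement is the Claim_ definition above) =====
theorem flatten_ngram_map_spec : Claim_equal_flatten_ngram_map := by
  intro m _
  unfold Spec_flatten_ngram_map flatten_ngram_map flatten_ngram_map_alt
  rw [pvMain m]; rfl
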